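-- pv_equiv track=rewrite | github.com/whitel15/Algorithm | Python/Programmers/Lv_2/할인 행사.py | solution
-- ===== SOURCE A (Python) =====
-- from collections import Counter
--
-- def solution(want, number, discount):
--     answer = 0
--     JHL = {}
--     for j in range(len(want)):
--         JHL[want[j]] = number[j]
--
--     for i in range(0, len(discount) - 9):
--         if JHL == Counter(discount[i:i+10]):
--             answer += 1
--
--     return answer
-- ===== SOURCE B (Python) =====
-- def solution(want, number, discount):
--     target = {}
--     for w, n in zip(want, number):
--         target[w] = n
--     if any(v <= 0 for v in target.values()):
--         return 0
--     if len(discount) < 10: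
--         return 0
--     cnt = {}
--     extra = 0
--     for x in discount[:10]:
--         if x in target:
--             cnt[x] = cnt.get(x, 0) + 1
--         else:
--             extra += 1
--     matched = sum(1 for k in target if cnt.get(k, 0) == target[k])
--     answer = 1 if (matched == len(target) and extra == 0) else 0
--     for i in range(10, len(discount)):
--         out = discount[i - 10]
--         inc = discount[i]
--         if out in target:
--             if cnt.get(out, 0) == target[out]:
--                 matched -= 1
--             cnt[out] = cnt.get(out, 0) - 1
--             if cnt.get(out, 0) == target[out]:
--                 matched += 1
--         else:
--             extra -= 1
--         if inc in target:
--             if cnt.get(inc, 0) == target[inc]: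
--                 matched -= 1
--             cnt[inc] = cnt.get(inc, 0) + 1
--             if cnt.get(inc, 0) == target[inc]:
--                 matched += 1
--         else:
--             extra += 1
--         if matched == len(target) and extra == 0:
--             answer += 1
--     return answer
-- ===== Notes on version B (the rewrite author's own statement) =====
-- stated objective: faster
-- what changed: A rebuilds a Counter of each 10-element slice and compares it to the target dict for every window; B builds the target dict once, then slides a single window over discount maintaining per-key counts, a matched-target-keys counter and an extra-elements counter, updating them in O(1) per step (with an upfront exit when some desired count is nonpositive or discount is shorter than 10, where no window can ever match).
import Mathlib
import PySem

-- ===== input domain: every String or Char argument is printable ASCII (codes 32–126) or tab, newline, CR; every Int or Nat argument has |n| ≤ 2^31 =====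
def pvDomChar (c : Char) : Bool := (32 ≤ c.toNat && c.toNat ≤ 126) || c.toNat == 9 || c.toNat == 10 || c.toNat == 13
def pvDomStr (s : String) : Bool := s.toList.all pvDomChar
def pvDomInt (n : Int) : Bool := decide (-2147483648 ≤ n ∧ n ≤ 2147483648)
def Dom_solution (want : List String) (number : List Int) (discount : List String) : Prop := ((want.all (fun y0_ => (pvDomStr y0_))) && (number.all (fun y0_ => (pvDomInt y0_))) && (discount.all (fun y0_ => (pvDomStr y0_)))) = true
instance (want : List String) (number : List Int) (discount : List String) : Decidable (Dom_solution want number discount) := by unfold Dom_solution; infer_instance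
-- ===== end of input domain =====

-- B replaces A's per-window Counter rebuild (O(n·w)) by one O(n) sliding-window pass that
-- maintains per-key counts, a matched-key counter and an extra-element counter.

-- ===== PORT A =====
-- Python 'dict == Counter(...)' is mapping equality (same keys, same values): ported as
-- mutual agreement of get? over both key lists.
def pyDictEq (d c : PySem.Dict String Int) : Bool :=
  d.keys.all (fun k => c.get? k == d.get? k) && c.keys.all (fun k => d.get? k == c.get? k)

def solution (want : List String) (number : List Int) (discount : List String) : Int :=
  let answer : Int := 0
  let JHL : PySem.Dict String Int :=
    (PySem.List.pyRange 0 (PySem.List.len want) 1).foldl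
      (fun d j => d.insert (PySem.List.pyGetD want j "") (PySem.List.pyGetD number j 0))
      PySem.Dict.empty
  let answer :=
    (PySem.List.pyRange 0 (PySem.List.len discount - 9) 1).foldl
      (fun a i =>
        if pyDictEq JHL (PySem.Dict.counter (PySem.List.slice discount (some i) (some (i + 10)))) then
          a + 1
        else a)
      answer
  answer

-- ===== PORT B =====
def buildTarget (want : List String) (number : List Int) : PySem.Dict String Int :=
  (want.zip number).foldl (fun d p => d.insert p.1 p.2) PySem.Dict.empty

-- body of B's sliding loop: drop discount[i-10], add discount[i], update matched/extra/answer
def stepB (target : PySem.Dict String Int) (discount : List String)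
    (s : PySem.Dict String Int × Int × Int × Int) (i : Int) :
    PySem.Dict String Int × Int × Int × Int :=
  let out := PySem.List.pyGetD discount (i - 10) ""
  let inc := PySem.List.pyGetD discount i ""
  let s1 : PySem.Dict String Int × Int × Int :=
    if target.contains out then
      let m1 := if s.1.getD out 0 == target.getD out 0 then s.2.1 - 1 else s.2.1
      let c1 := s.1.modify out 0 (· - 1)
      let m2 := if c1.getD out 0 == target.getD out 0 then m1 + 1 else m1
      (c1, m2, s.2.2.1)
    else (s.1, s.2.1, s.2.2.1 - 1)
  let s2 : PySem.Dict String Int × Int × Int :=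
    if target.contains inc then
      let m1 := if s1.1.getD inc 0 == target.getD inc 0 then s1.2.1 - 1 else s1.2.1
      let c1 := s1.1.modify inc 0 (· + 1)
      let m2 := if c1.getD inc 0 == target.getD inc 0 then m1 + 1 else m1
      (c1, m2, s1.2.2)
    else (s1.1, s1.2.1, s1.2.2 + 1)
  (s2.1, s2.2.1, s2.2.2,
    if s2.2.1 == (target.size : Int) && s2.2.2 == 0 then s.2.2.2 + 1 else s.2.2.2)

def solution_alt (want : List String) (number : List Int) (discount : List String) : Int :=
  let target := buildTarget want number
  if target.values.any (fun v => decide (v ≤ 0)) then 0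
  else if discount.length < 10 then 0
  else
    let init := (PySem.List.slice discount none (some 10)).foldl
      (fun (s : PySem.Dict String Int × Int) x =>
        if target.contains x then (s.1.modify x 0 (· + 1), s.2) else (s.1, s.2 + 1))
      (PySem.Dict.empty, 0)
    let cnt := init.1
    let extra := init.2
    let matched : Int := target.keys.foldl
      (fun m k => if cnt.getD k 0 == target.getD k 0 then m + 1 else m) 0
    let answer : Int := if matched == (target.size : Int) && extra == 0 then 1 else 0
    let fin := (PySem.List.pyRange 10 (PySem.List.len discount) 1).foldl
      (stepB target discount) (cnt, matched, extra, answer)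
    fin.2.2.2

-- ===== PRECONDITION & SPEC =====
-- Pre_ excludes exactly the inputs where A raises IndexError: want longer than number.
def Pre_solution (want : List String) (number : List Int) (discount : List String) : Prop :=
  want.length ≤ number.length
instance (want : List String) (number : List Int) (discount : List String) : Decidable (Pre_solution want number discount) := by unfold Pre_solution; infer_instance

def pvWitness_solution : List String × List Int × List String := (["a"], [1], [])

def Spec_solution (want : List String) (number : List Int) (discount : List String) (out : Int) : Prop := out = solution_alt want number discount
instance (want : List String) (number : List Int) (discount : List String) (out : Int) : Decidable (Spec_solution want number discount out) := by unfold Spec_solution; infer_instance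

-- ===== CLAIM (what is proved, stated in full; the proofs are below) =====
def Claim_equal_solution : Prop := ∀ (want : List String) (number : List Int) (discount : List String), Dom_solution want number discount → Pre_solution want number discount → Spec_solution want number discount (solution want number discount)


-- ===== LEMMAS AND PROOFS =====

-- the 10-element window of discount ending at position j
def wnd (discount : List String) (j : Nat) : List String := (discount.drop (j - 10)).take 10

-- the per-window success criterion, stated on the window itself
def goodb (t : PySem.Dict String Int) (w : List String) : Bool :=
  ((t.keys.countP (fun k => ((w.count k : Int) == t.getD k 0))) == t.keys.length)
    && ((w.countP (fun x => !t.contains x)) == 0)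

lemma buildA_eq (want : List String) (number : List Int) (h : want.length ≤ number.length) :
    (PySem.List.pyRange 0 (PySem.List.len want) 1).foldl
      (fun d j => d.insert (PySem.List.pyGetD want j "") (PySem.List.pyGetD number j 0))
      PySem.Dict.empty = buildTarget want number := by
  unfold buildTarget
  have hzl : (want.zip number).length = want.length := by
    rw [List.length_zip]; omega
  have hb : PySem.List.len want = PySem.List.len (want.zip number) := by
    simp [PySem.List.len, hzl]
  rw [hb]
  rw [PySem.List.foldl_congr_mem _ _
    (fun (d : PySem.Dict String Int) (j : Int) =>
      d.insert (PySem.List.pyGetD (want.zip number) j ("", 0)).1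
        (PySem.List.pyGetD (want.zip number) j ("", 0)).2) _ ?_]
  · exact PySem.List.foldl_pyRange_zero_pyGetD (want.zip number) ("", 0)
      (fun d (p : String × Int) => d.insert p.1 p.2) PySem.Dict.empty
  · intro acc j hj
    have hj' := (PySem.List.mem_pyRange_one).mp hj
    have hjz : j < ((want.zip number).length : Int) := by
      simpa [PySem.List.len] using hj'.2
    have h0 : 0 ≤ j := hj'.1
    have hjw : j < (want.length : Int) := by omega
    have hjn : j < (number.length : Int) := by omega
    show acc.insert (PySem.List.pyGetD want j "") (PySem.List.pyGetD number j 0)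
      = acc.insert (PySem.List.pyGetD (want.zip number) j ("", 0)).1
          (PySem.List.pyGetD (want.zip number) j ("", 0)).2
    rw [PySem.List.pyGetD_eq_getElem want "" h0 hjw,
        PySem.List.pyGetD_eq_getElem number 0 h0 hjn,
        PySem.List.pyGetD_eq_getElem (want.zip number) ("", 0) h0 hjz]
    rw [List.getElem_zip]

lemma nodup_target (want : List String) (number : List Int) :
    (buildTarget want number).keys.Nodup := by
  exact PySem.Dict.nodup_keys_foldl_insert_key (want.zip number) Prod.fst
    (fun _ p => p.2) PySem.Dict.empty PySem.Dict.nodup_keys_empty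

lemma pos_of_any_false (t : PySem.Dict String Int) (hnd : t.keys.Nodup)
    (h : t.values.any (fun v => decide (v ≤ 0)) = false) :
    ∀ k ∈ t.keys, 1 ≤ t.getD k 0 := by
  intro k hk
  have hv : t.getD k 0 ∈ t.values := by
    rw [PySem.Dict.values_eq_map_keys t hnd 0]
    exact List.mem_map.mpr ⟨k, hk, rfl⟩
  have := List.any_eq_false.mp h _ hv
  simp only [decide_eq_true_eq] at this
  omega

lemma counter_get? (w : List String) (k : String) :
    (PySem.Dict.counter w).get? k = if k ∈ w then some ((w.count k : Nat) : Int) else none := by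
  by_cases hk : k ∈ w
  · rw [if_pos hk]
    have hc : (PySem.Dict.counter w).contains k = true := by
      rw [PySem.Dict.contains_counter]; simpa using hk
    cases hg : (PySem.Dict.counter w).get? k with
    | none =>
      rw [PySem.Dict.get?_eq_none_iff_contains] at hg
      rw [hg] at hc; cases hc
    | some v =>
      have hv := PySem.Dict.getD_of_get?_eq_some _ 0 hg
      rw [PySem.Dict.getD_counter] at hv
      rw [← hv]
  · rw [if_neg hk]
    rw [PySem.Dict.get?_eq_none_iff_contains, PySem.Dict.contains_counter]
    simpa using hk

lemma get?_of_mem_keys' (t : PySem.Dict String Int) (k : String) (hk : k ∈ t.keys) :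
    t.get? k = some (t.getD k 0) := by
  cases hg : t.get? k with
  | none =>
    have := (PySem.Dict.get?_eq_none_iff_contains t k).mp hg
    rw [(PySem.Dict.contains_iff_mem_keys t k).mpr hk] at this
    cases this
  | some v => rw [PySem.Dict.getD_of_get?_eq_some _ 0 hg]

lemma pyDictEq_eq_goodb (t : PySem.Dict String Int) (hnd : t.keys.Nodup)
    (hpos : ∀ k ∈ t.keys, 1 ≤ t.getD k 0) (w : List String) :
    pyDictEq t (PySem.Dict.counter w) = goodb t w := by
  rw [Bool.eq_iff_iff]
  unfold pyDictEq goodb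
  simp only [Bool.and_eq_true, List.all_eq_true, beq_iff_eq, List.countP_eq_length,
    List.countP_eq_zero, Bool.not_eq_true', Bool.not_eq_false]
  constructor
  · rintro ⟨h1, h2⟩
    constructor
    · intro k hk
      have hg := get?_of_mem_keys' t k hk
      have := h1 k hk
      rw [hg, counter_get?] at this
      by_cases hw : k ∈ w
      · rw [if_pos hw] at this
        exact Option.some.inj this
      · rw [if_neg hw] at this; cases this
    · intro x hx
      have hxk : x ∈ (PySem.Dict.counter w).keys := by
        rw [PySem.Dict.keys_counter]; exact (PySem.Set.mem_ofList w x).mpr hx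
      have := h2 x hxk
      rw [counter_get?, if_pos hx] at this
      by_contra hcx
      have hnone : t.get? x = none :=
        (PySem.Dict.get?_eq_none_iff_contains t x).mpr (by simpa using hcx)
      rw [hnone] at this; cases this
  · rintro ⟨h1, h2⟩
    have hval : ∀ k ∈ t.keys, (PySem.Dict.counter w).get? k = t.get? k := by
      intro k hk
      have hcnt := h1 k hk
      have hpos' := hpos k hk
      have hkw : k ∈ w := by
        have : 0 < w.count k := by omega
        exact List.count_pos_iff.mp this
      rw [counter_get?, if_pos hkw, get?_of_mem_keys' t k hk, hcnt]
    refine ⟨hval, ?_⟩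
    intro k hk
    have hkw : k ∈ w := by
      rw [PySem.Dict.keys_counter] at hk; exact (PySem.Set.mem_ofList w k).mp hk
    have hmem : k ∈ t.keys := (PySem.Dict.contains_iff_mem_keys t k).mp (h2 k hkw)
    exact (hval k hmem).symm

lemma pyDictEq_false_of_nonpos (t : PySem.Dict String Int) (hnd : t.keys.Nodup)
    (h : t.values.any (fun v => decide (v ≤ 0)) = true) (w : List String) :
    pyDictEq t (PySem.Dict.counter w) = false := by
  rw [PySem.Dict.values_eq_map_keys t hnd 0] at h
  obtain ⟨v, hv, hv0⟩ := List.any_eq_true.mp h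
  obtain ⟨k, hk, rfl⟩ := List.mem_map.mp hv
  simp only [decide_eq_true_eq] at hv0
  unfold pyDictEq
  have hall : t.keys.all (fun k => (PySem.Dict.counter w).get? k == t.get? k) = false := by
    rw [List.all_eq_false]
    refine ⟨k, hk, ?_⟩
    rw [get?_of_mem_keys' t k hk, counter_get?]
    by_cases hw : k ∈ w
    · rw [if_pos hw]
      have : 0 < w.count k := List.count_pos_iff.mpr hw
      simp only [beq_iff_eq, Option.some.injEq]
      omega
    · rw [if_neg hw]; simp
  rw [hall, Bool.false_and]

lemma countP_change {α : Type} (l : List α) (p q : α → Bool) (u : α) (hnd : l.Nodup)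
    (hu : u ∈ l) (h : ∀ x ∈ l, x ≠ u → p x = q x) :
    (l.countP q : Int) = l.countP p - (if p u then 1 else 0) + (if q u then 1 else 0) := by
  induction l with
  | nil => cases hu
  | cons x l ih =>
    rcases List.nodup_cons.mp hnd with ⟨hx, hndl⟩
    rcases List.mem_cons.mp hu with rfl | hul
    · have hpq : l.countP p = l.countP q :=
        List.countP_congr (fun y hy => by rw [h y (List.mem_cons_of_mem _ hy) (fun e => hx (e ▸ hy))])
      simp only [List.countP_cons, hpq]
      split_ifs <;> push_cast <;> omega
    · have hxu : x ≠ u := fun e => hx (e ▸ hul)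
      have hpx : p x = q x := h x (List.mem_cons_self ..) hxu
      have := ih hndl hul (fun y hy hyu => h y (List.mem_cons_of_mem _ hy) hyu)
      simp only [List.countP_cons, ← hpx]
      by_cases hx' : p x = true <;> simp [hx'] <;> push_cast at this ⊢ <;> omega

lemma initfold_getD (t : PySem.Dict String Int) (l : List String)
    (d0 : PySem.Dict String Int) (e0 : Int) (k : String) (hk : t.contains k = true) :
    ((l.foldl (fun s x => if t.contains x then (s.1.modify x 0 (· + 1), s.2) else (s.1, s.2 + 1))
        (d0, e0)).1).getD k 0 = d0.getD k 0 + l.count k := by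
  induction l generalizing d0 e0 with
  | nil => simp
  | cons x l ih =>
    simp only [List.foldl_cons]
    by_cases hx : t.contains x = true
    · rw [if_pos hx, ih]
      rw [PySem.Dict.getD_modify, List.count_cons]
      by_cases hkx : k = x
      · subst hkx
        rw [if_pos rfl, if_pos (beq_self_eq_true k)]
        push_cast; ring
      · have hbk : ¬ (x == k) = true := by
          intro hb; exact hkx (by exact (beq_iff_eq.mp hb).symm)
        rw [if_neg hkx, if_neg hbk]
        push_cast; ring
    · rw [if_neg hx, ih, List.count_cons]
      have hkx : k ≠ x := fun e => hx (e ▸ hk)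
      have hbk : ¬ (x == k) = true := by
        intro hb; exact hkx (by exact (beq_iff_eq.mp hb).symm)
      rw [if_neg hbk]
      push_cast; ring

lemma initfold_extra (t : PySem.Dict String Int) (l : List String)
    (d0 : PySem.Dict String Int) (e0 : Int) :
    (l.foldl (fun s x => if t.contains x then (s.1.modify x 0 (· + 1), s.2) else (s.1, s.2 + 1))
        (d0, e0)).2 = e0 + (l.countP (fun x => !t.contains x) : Int) := by
  induction l generalizing d0 e0 with
  | nil => simp
  | cons x l ih =>
    simp only [List.foldl_cons, List.countP_cons]
    by_cases hx : t.contains x = true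
    · rw [if_pos hx, ih]
      rw [hx, Bool.not_true]
      push_cast; ring
    · rw [if_neg hx, ih]
      have hx' : t.contains x = false := eq_false_of_ne_true hx
      rw [hx', Bool.not_false, if_pos rfl]
      push_cast; ring

lemma wnd_eq_cons (discount : List String) (a : Nat) (h10 : 10 ≤ a) (hn : a ≤ discount.length) :
    wnd discount a = discount.getD (a - 10) "" :: (discount.drop (a - 9)).take 9 := by
  unfold wnd
  have h1 : a - 10 < discount.length := by omega
  rw [List.drop_eq_getElem_cons h1]
  rw [List.getD_eq_getElem _ _ h1]
  have : a - 10 + 1 = a - 9 := by omega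
  rw [this]
  rfl

lemma wnd_eq_snoc (discount : List String) (a : Nat) (h10 : 10 ≤ a) (hn : a < discount.length) :
    wnd discount (a + 1) = (discount.drop (a - 9)).take 9 ++ [discount.getD a ""] := by
  unfold wnd
  have h1 : a + 1 - 10 = a - 9 := by omega
  rw [h1]
  have h2 : (10 : Nat) = 9 + 1 := rfl
  rw [h2, List.take_add_one]
  congr 1
  rw [List.getElem?_drop]
  have h3 : a - 9 + 9 = a := by omega
  rw [h3]
  rw [List.getElem?_eq_getElem hn, List.getD_eq_getElem _ _ hn]
  rfl

lemma goodb_eq_check (t : PySem.Dict String Int) (cnt : PySem.Dict String Int) (w : List String)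
    (hc : ∀ k, t.contains k = true → cnt.getD k 0 = ((w.count k : Nat) : Int)) :
    ((((t.keys.countP (fun k => cnt.getD k 0 == t.getD k 0)) : Int) == ((t.size : Nat) : Int))
      && ((((w.countP (fun x => !t.contains x)) : Nat) : Int) == 0)) = goodb t w := by
  unfold goodb
  have hpred : t.keys.countP (fun k => cnt.getD k 0 == t.getD k 0)
      = t.keys.countP (fun k => (((w.count k : Nat) : Int) == t.getD k 0)) :=
    List.countP_congr (fun k hk => by
      rw [hc k ((PySem.Dict.contains_iff_mem_keys t k).mpr hk)])
  rw [hpred]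
  have hsz : t.size = t.keys.length := by
    simp [PySem.Dict.size, PySem.Dict.keys]
  rw [hsz]
  congr 1 <;> rw [Bool.eq_iff_iff] <;> simp

lemma matched_phase (t : PySem.Dict String Int) (hnd : t.keys.Nodup)
    (cnt : PySem.Dict String Int) (u : String) (hu : t.contains u = true) (f : Int → Int) :
    (if (cnt.modify u 0 f).getD u 0 == t.getD u 0 then
        (if cnt.getD u 0 == t.getD u 0 then
            ((t.keys.countP (fun k => cnt.getD k 0 == t.getD k 0)) : Int) - 1
          else ((t.keys.countP (fun k => cnt.getD k 0 == t.getD k 0)) : Int)) + 1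
      else
        (if cnt.getD u 0 == t.getD u 0 then
            ((t.keys.countP (fun k => cnt.getD k 0 == t.getD k 0)) : Int) - 1
          else ((t.keys.countP (fun k => cnt.getD k 0 == t.getD k 0)) : Int)))
    = ((t.keys.countP (fun k => (cnt.modify u 0 f).getD k 0 == t.getD k 0)) : Int) := by
  have hmem : u ∈ t.keys := (PySem.Dict.contains_iff_mem_keys t u).mp hu
  have hch := countP_change t.keys (fun k => cnt.getD k 0 == t.getD k 0)
    (fun k => (cnt.modify u 0 f).getD k 0 == t.getD k 0) u hnd hmem
    (fun k _ hku => by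
      show (cnt.getD k 0 == t.getD k 0) = ((cnt.modify u 0 f).getD k 0 == t.getD k 0)
      rw [PySem.Dict.getD_modify, if_neg hku])
  rw [hch]
  split_ifs <;> ring

lemma step_ok (t : PySem.Dict String Int) (hnd : t.keys.Nodup) (discount : List String)
    (a : Nat) (h10 : 10 ≤ a) (hn : a < discount.length)
    (cnt : PySem.Dict String Int) (matched extra answer : Int)
    (hc : ∀ k, t.contains k = true → cnt.getD k 0 = ((wnd discount a).count k : Int))
    (hm : matched = (t.keys.countP (fun k => cnt.getD k 0 == t.getD k 0) : Int))
    (he : extra = ((wnd discount a).countP (fun x => !t.contains x) : Int)) :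
    ∃ cnt', stepB t discount (cnt, matched, extra, answer) (a : Int) =
      (cnt', (t.keys.countP (fun k => cnt'.getD k 0 == t.getD k 0) : Int),
        ((wnd discount (a + 1)).countP (fun x => !t.contains x) : Int),
        answer + (if goodb t (wnd discount (a + 1)) then 1 else 0))
      ∧ ∀ k, t.contains k = true → cnt'.getD k 0 = ((wnd discount (a + 1)).count k : Int) := by
  have hle : a ≤ discount.length := Nat.le_of_lt hn
  have hwa : wnd discount a = discount.getD (a - 10) "" :: (discount.drop (a - 9)).take 9 :=
    wnd_eq_cons discount a h10 hle
  have hwa1 : wnd discount (a + 1) = (discount.drop (a - 9)).take 9 ++ [discount.getD a ""] :=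
    wnd_eq_snoc discount a h10 hn
  set o := discount.getD (a - 10) "" with ho
  set i_ := discount.getD a "" with hi
  set rest := (discount.drop (a - 9)).take 9 with hrest
  have hout : PySem.List.pyGetD discount ((a : Int) - 10) "" = o := by
    have he' : (a : Int) - 10 = ((a - 10 : Nat) : Int) := by
      rw [Nat.cast_sub h10]; norm_num
    rw [he', PySem.List.pyGetD_natCast]
  have hinc : PySem.List.pyGetD discount ((a : Int)) "" = i_ :=
    PySem.List.pyGetD_natCast discount a ""
  -- counts of the outgoing window
  have hcount_a : ∀ k, (wnd discount a).count k = rest.count k + (if o == k then 1 else 0) := by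
    intro k; rw [hwa, List.count_cons]
  have hcount_a1 : ∀ k, (wnd discount (a + 1)).count k
      = rest.count k + (if i_ == k then 1 else 0) := by
    intro k; rw [hwa1, List.count_append, List.count_singleton]
  -- phase 1 (remove o)
  set c1 := if t.contains o = true then cnt.modify o 0 (· - 1) else cnt with hc1def
  have hc1 : ∀ k, t.contains k = true → c1.getD k 0 = (rest.count k : Int) := by
    intro k hk
    by_cases hco : t.contains o = true
    · rw [hc1def, if_pos hco, PySem.Dict.getD_modify]
      by_cases hko : k = o
      · rw [if_pos hko, hko, hc o hco, hcount_a o, if_pos (beq_self_eq_true o)]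
        push_cast; ring
      · rw [if_neg hko, hc k hk, hcount_a k,
          if_neg (fun hb => hko (beq_iff_eq.mp hb).symm)]
        push_cast; ring
    · have hko : k ≠ o := fun e => hco (e ▸ hk)
      rw [hc1def, if_neg hco, hc k hk, hcount_a k,
        if_neg (fun hb => hko (beq_iff_eq.mp hb).symm)]
      push_cast; ring
  -- phase 2 (add i_)
  set c2 := if t.contains i_ = true then c1.modify i_ 0 (· + 1) else c1 with hc2def
  have hc2 : ∀ k, t.contains k = true → c2.getD k 0 = ((wnd discount (a + 1)).count k : Int) := by
    intro k hk
    by_cases hci : t.contains i_ = true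
    · rw [hc2def, if_pos hci, PySem.Dict.getD_modify]
      by_cases hki : k = i_
      · rw [if_pos hki, hki, hc1 i_ hci, hcount_a1 i_, if_pos (beq_self_eq_true i_)]
        push_cast; ring
      · rw [if_neg hki, hc1 k hk, hcount_a1 k,
          if_neg (fun hb => hki (beq_iff_eq.mp hb).symm)]
        push_cast; ring
    · have hki : k ≠ i_ := fun e => hci (e ▸ hk)
      rw [hc2def, if_neg hci, hc1 k hk, hcount_a1 k,
        if_neg (fun hb => hki (beq_iff_eq.mp hb).symm)]
      push_cast; ring
  refine ⟨c2, ?_, hc2⟩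
  -- the window-criterion equality used for the answer update
  have hgood : ∀ (m e : Int),
      m = ((t.keys.countP (fun k => c2.getD k 0 == t.getD k 0)) : Int) →
      e = (((wnd discount (a + 1)).countP (fun x => !t.contains x)) : Int) →
      ((m == ((t.size : Nat) : Int)) && (e == 0)) = goodb t (wnd discount (a + 1)) := by
    intro m e hm' he'
    rw [hm', he']
    exact goodb_eq_check t c2 (wnd discount (a + 1)) hc2
  -- extra bookkeeping
  have hextra_a : extra = (if t.contains o = true then (0 : Int) else 1)
      + (rest.countP (fun x => !t.contains x) : Int) := by
    rw [he, hwa, List.countP_cons]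
    by_cases hco : t.contains o = true
    · rw [if_pos hco, hco, Bool.not_true, if_neg (by simp)]
      push_cast; ring
    · have hco' : t.contains o = false := eq_false_of_ne_true hco
      rw [if_neg hco, hco', Bool.not_false, if_pos rfl]
      push_cast; ring
  have hextra_a1 : ((wnd discount (a + 1)).countP (fun x => !t.contains x) : Int)
      = (rest.countP (fun x => !t.contains x) : Int)
        + (if t.contains i_ = true then (0 : Int) else 1) := by
    rw [hwa1, List.countP_append, List.countP_cons, List.countP_nil]
    by_cases hci : t.contains i_ = true
    · rw [if_pos hci, hci, Bool.not_true, if_neg (by simp)]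
      push_cast; ring
    · have hci' : t.contains i_ = false := eq_false_of_ne_true hci
      rw [if_neg hci, hci', Bool.not_false, if_pos rfl]
      push_cast; ring
  -- now unfold stepB and close by case analysis on the two membership tests
  simp only [stepB, hout, hinc]
  by_cases hco : t.contains o = true
  · by_cases hci : t.contains i_ = true
    · -- both ends are target keys
      simp only [hco, hci, if_true, if_false, Bool.false_eq_true]
      have e2' : c2 = (cnt.modify o 0 (· - 1)).modify i_ 0 (· + 1) := by
        rw [hc2def, if_pos hci, hc1def, if_pos hco]
      have hex : extra = (((wnd discount (a + 1)).countP (fun x => !t.contains x)) : Int) := by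
        rw [hextra_a, if_pos hco, hextra_a1, if_pos hci]; ring
      rw [e2'] at hgood ⊢
      rw [hm, matched_phase t hnd cnt o hco (fun x => x - 1),
        matched_phase t hnd (cnt.modify o 0 (fun x => x - 1)) i_ hci (fun x => x + 1), hex,
        hgood _ _ rfl rfl]
      simp only [Prod.mk.injEq]
      refine ⟨trivial, trivial, trivial, ?_⟩
      split_ifs <;> ring
    · -- o is a target key, i_ is not
      simp only [hco, hci, if_true, if_false, Bool.false_eq_true]
      have e2' : c2 = cnt.modify o 0 (· - 1) := by
        rw [hc2def, if_neg hci, hc1def, if_pos hco]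
      have hex : extra + 1 = (((wnd discount (a + 1)).countP (fun x => !t.contains x)) : Int) := by
        rw [hextra_a, if_pos hco, hextra_a1, if_neg hci]; ring
      rw [e2'] at hgood ⊢
      rw [hm, matched_phase t hnd cnt o hco (fun x => x - 1), hex, hgood _ _ rfl rfl]
      simp only [Prod.mk.injEq]
      refine ⟨trivial, trivial, trivial, ?_⟩
      split_ifs <;> ring
  · by_cases hci : t.contains i_ = true
    · -- i_ is a target key, o is not
      simp only [hco, hci, if_true, if_false, Bool.false_eq_true]
      have e2' : c2 = cnt.modify i_ 0 (· + 1) := by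
        rw [hc2def, if_pos hci, hc1def, if_neg hco]
      have hex : extra - 1 = (((wnd discount (a + 1)).countP (fun x => !t.contains x)) : Int) := by
        rw [hextra_a, if_neg hco, hextra_a1, if_pos hci]; ring
      rw [e2'] at hgood ⊢
      rw [hm, matched_phase t hnd cnt i_ hci (fun x => x + 1), hex, hgood _ _ rfl rfl]
      simp only [Prod.mk.injEq]
      refine ⟨trivial, trivial, trivial, ?_⟩
      split_ifs <;> ring
    · -- neither end is a target key
      simp only [hco, hci, if_true, if_false, Bool.false_eq_true]
      have e2' : c2 = cnt := by
        rw [hc2def, if_neg hci, hc1def, if_neg hco]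
      have hex : extra - 1 + 1 = (((wnd discount (a + 1)).countP (fun x => !t.contains x)) : Int) := by
        rw [hextra_a, if_neg hco, hextra_a1, if_neg hci]; ring
      rw [e2'] at hgood ⊢
      rw [hm, hex, hgood _ _ rfl rfl]
      simp only [Prod.mk.injEq]
      refine ⟨trivial, trivial, trivial, ?_⟩
      split_ifs <;> ring

lemma loop_ok (t : PySem.Dict String Int) (hnd : t.keys.Nodup) (discount : List String) :
    ∀ (m a : Nat), 10 ≤ a → a + m = discount.length →
    ∀ (cnt : PySem.Dict String Int) (matched extra answer : Int),
    (∀ k, t.contains k = true → cnt.getD k 0 = ((wnd discount a).count k : Int)) →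
    matched = (t.keys.countP (fun k => cnt.getD k 0 == t.getD k 0) : Int) →
    extra = ((wnd discount a).countP (fun x => !t.contains x) : Int) →
    ((PySem.List.pyRange (a : Int) ((discount.length : Int)) 1).foldl
        (stepB t discount) (cnt, matched, extra, answer)).2.2.2
      = answer + ((List.range m).countP (fun j => goodb t (wnd discount (a + 1 + j))) : Int) := by
  intro m
  induction m with
  | zero =>
    intro a h10 hlen cnt matched extra answer hc hm he
    rw [PySem.List.pyRange_one_eq_nil (by exact_mod_cast Nat.le_of_eq (by omega))]
    simp
  | succ m ih =>
    intro a h10 hlen cnt matched extra answer hc hm he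
    have han : a < discount.length := by omega
    rw [PySem.List.pyRange_one_cons (by exact_mod_cast han)]
    rw [List.foldl_cons]
    obtain ⟨cnt', hstep, hc'⟩ :=
      step_ok t hnd discount a h10 han cnt matched extra answer hc hm he
    rw [hstep]
    have h1 : ((a : Int) + 1) = (((a + 1 : Nat)) : Int) := by push_cast; ring
    rw [h1]
    rw [ih (a + 1) (by omega) (by omega) cnt' _ _ _ hc' rfl rfl]
    rw [List.range_succ_eq_map, List.countP_cons, List.countP_map]
    have hps : List.countP ((fun j => goodb t (wnd discount (a + 1 + j))) ∘ Nat.succ) (List.range m)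
        = List.countP (fun j => goodb t (wnd discount (a + 1 + 1 + j))) (List.range m) := by
      refine List.countP_congr (fun j _ => ?_)
      show goodb t (wnd discount (a + 1 + (j + 1))) = true ↔ goodb t (wnd discount (a + 1 + 1 + j)) = true
      rw [show a + 1 + (j + 1) = a + 1 + 1 + j by omega]
    rw [hps]
    rw [show a + 1 + 0 = a + 1 by omega]
    by_cases hg : goodb t (wnd discount (a + 1)) = true <;> simp only [hg, if_true, if_false, Bool.false_eq_true] <;> push_cast <;> ring

lemma A_sum (t : PySem.Dict String Int) (discount : List String) :
    (PySem.List.pyRange 0 (PySem.List.len discount - 9) 1).foldl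
      (fun a i =>
        if pyDictEq t (PySem.Dict.counter (PySem.List.slice discount (some i) (some (i + 10)))) then
          a + 1
        else a) 0
    = ((List.range ((discount.length : Int) - 9).toNat).countP
        (fun j => pyDictEq t (PySem.Dict.counter (wnd discount (j + 10)))) : Int) := by
  rw [PySem.List.foldl_count_if]
  rw [PySem.List.pyRange_one, List.countP_map]
  simp only [PySem.List.len, sub_zero, zero_add]
  refine congrArg Nat.cast (List.countP_congr (fun j _ => ?_))
  have hs : PySem.List.slice discount (some ((j : Nat) : Int))
      (some (((j : Nat) : Int) + 10)) = wnd discount (j + 10) := by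
    have h10 : ((10 : Int)) = (((10 : Nat) : Nat) : Int) := by norm_num
    rw [h10, PySem.List.slice_natCast_add]
    unfold wnd
    rw [Nat.add_sub_cancel]
  show pyDictEq t (PySem.Dict.counter (PySem.List.slice discount (some ((j : Nat) : Int))
      (some (((j : Nat) : Int) + 10)))) = true
    ↔ pyDictEq t (PySem.Dict.counter (wnd discount (j + 10))) = true
  rw [hs]

-- ===== VERDICT (by name: the statement is the Claim_ definition above) =====
theorem solution_spec : Claim_equal_solution := by
  intro want number discount _ hpre
  unfold Spec_solution
  unfold Pre_solution at hpre
  simp only [solution, solution_alt]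
  rw [buildA_eq want number hpre]
  have hnd := nodup_target want number
  by_cases hneg : (buildTarget want number).values.any (fun v => decide (v ≤ 0)) = true
  · rw [if_pos hneg]
    rw [PySem.List.foldl_count_if]
    rw [List.countP_eq_zero.mpr (fun i _ => by
      rw [pyDictEq_false_of_nonpos (buildTarget want number) hnd hneg]; simp)]
    norm_num
  · rw [if_neg hneg]
    have hpos := pos_of_any_false (buildTarget want number) hnd (eq_false_of_ne_true hneg)
    by_cases hlen : discount.length < 10
    · rw [if_pos hlen]
      rw [PySem.List.pyRange_one_eq_nil (by simp only [PySem.List.len]; omega)]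
      rfl
    · rw [if_neg hlen]
      have hn10 : 10 ≤ discount.length := by omega
      rw [A_sum (buildTarget want number) discount]
      rw [List.countP_congr (fun j _ => by
        rw [pyDictEq_eq_goodb (buildTarget want number) hnd hpos] :
          ∀ j ∈ List.range ((discount.length : Int) - 9).toNat,
            (pyDictEq (buildTarget want number)
              (PySem.Dict.counter (wnd discount (j + 10))) = true)
            ↔ (goodb (buildTarget want number) (wnd discount (j + 10)) = true))]
      have hsl : PySem.List.slice discount none (some 10) = discount.take 10 := by
        rw [show (10 : Int) = ((10 : Nat) : Int) by norm_num, PySem.List.slice_to_natCast]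
      rw [hsl]
      have hwnd10 : wnd discount 10 = discount.take 10 := by unfold wnd; simp
      have hc0 : ∀ k, (buildTarget want number).contains k = true →
          ((discount.take 10).foldl
            (fun (s : PySem.Dict String Int × Int) x =>
              if (buildTarget want number).contains x then (s.1.modify x 0 (· + 1), s.2)
              else (s.1, s.2 + 1)) (PySem.Dict.empty, 0)).1.getD k 0
          = ((wnd discount 10).count k : Int) := by
        intro k hk
        rw [initfold_getD (buildTarget want number) (discount.take 10) _ _ k hk,
          PySem.Dict.getD_empty, hwnd10]
        ring
      have he0 : ((discount.take 10).foldl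
            (fun (s : PySem.Dict String Int × Int) x =>
              if (buildTarget want number).contains x then (s.1.modify x 0 (· + 1), s.2)
              else (s.1, s.2 + 1)) (PySem.Dict.empty, 0)).2
          = ((wnd discount 10).countP (fun x => !(buildTarget want number).contains x) : Int) := by
        rw [initfold_extra, hwnd10]
        ring
      rw [PySem.List.foldl_count_if, zero_add, he0]
      rw [goodb_eq_check (buildTarget want number) _ (wnd discount 10) hc0]
      simp only [PySem.List.len]
      rw [show (10 : Int) = ((10 : Nat) : Int) by norm_num]
      rw [loop_ok (buildTarget want number) hnd discount (discount.length - 10) 10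
        (le_refl 10) (by omega) _ _ _ _ hc0 rfl rfl]
      rw [show ((discount.length : Int) - 9).toNat = discount.length - 9 by omega]
      rw [show discount.length - 9 = (discount.length - 10) + 1 by omega]
      rw [List.range_succ_eq_map, List.countP_cons, List.countP_map]
      rw [List.countP_congr (fun j _ => by
        show goodb (buildTarget want number) (wnd discount (j + 1 + 10)) = true
          ↔ goodb (buildTarget want number) (wnd discount (10 + 1 + j)) = true
        rw [show j + 1 + 10 = 10 + 1 + j by omega] :
          ∀ j ∈ List.range (discount.length - 10),
            ((fun j => goodb (buildTarget want number) (wnd discount (j + 10))) ∘ Nat.succ) j = true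
            ↔ goodb (buildTarget want number) (wnd discount (10 + 1 + j)) = true)]
      rw [show (0 + 10 : Nat) = 10 by omega]
      by_cases hg : goodb (buildTarget want number) (wnd discount 10) = true <;>
        simp only [hg, if_true, if_false, Bool.false_eq_true] <;> push_cast <;> ring
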